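-- pv_equiv track=rewrite | github.com/colonelpanic8/dotfiles | dotfiles/lib/python/powerset.py | powerset_helper
-- ===== SOURCE A (Python) =====
-- import copy
--
-- def powerset_helper(elems):
--     last_generation = [[]]
--     for (elem, count) in elems:
--         next_generation = last_generation
--         for _ in range(count):
--             new_generation = []
--             for subset in last_generation:
--                 new_subset = copy.copy(subset)
--                 new_subset.append(elem)
--                 new_generation.append(new_subset)
--             next_generation.extend(new_generation)
--             last_generation = new_generation
--         last_generation = next_generation
--     return last_generation
-- ===== SOURCE B (Python) =====
-- def powerset_helper(elems):
--     result = [[]]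
--     for (elem, count) in elems:
--         new_result = []
--         for k in range(max(count, 0) + 1):
--             for subset in result:
--                 new_result.append(subset + [elem] * k)
--         result = new_result
--     return result
-- ===== Notes on version B (the rewrite author's own statement) =====
-- stated objective: simpler
-- what changed: B builds each multiplicity block directly as subset + [elem]*k for k = 0..count instead of A's chain of incremental generations that copy the previous generation and append one element, mutating/extending an aliased list.
import Mathlib
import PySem

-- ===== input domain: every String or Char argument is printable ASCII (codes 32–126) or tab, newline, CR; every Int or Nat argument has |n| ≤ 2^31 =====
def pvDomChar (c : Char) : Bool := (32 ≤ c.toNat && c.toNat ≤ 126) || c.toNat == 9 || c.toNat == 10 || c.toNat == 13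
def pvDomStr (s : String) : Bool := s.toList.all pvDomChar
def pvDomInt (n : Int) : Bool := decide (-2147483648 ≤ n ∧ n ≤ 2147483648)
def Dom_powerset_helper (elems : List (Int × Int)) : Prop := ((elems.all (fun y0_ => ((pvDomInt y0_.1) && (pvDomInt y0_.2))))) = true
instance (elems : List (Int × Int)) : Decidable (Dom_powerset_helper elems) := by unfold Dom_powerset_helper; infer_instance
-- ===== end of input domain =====

-- B builds each multiplicity block directly as subset ++ [elem]*k instead of A's chain of
-- incremental generations; objective: simpler (same output, same order).

-- ===== PORT A =====
-- A's inner loop is modelled by the pure state (next_generation, last_generation): the alias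
-- 'next_generation = last_generation' followed by extend/reassignment amounts to this pair.
def powerset_helper (elems : List (Int × Int)) : List (List Int) :=
  elems.foldl (fun last p =>
    ((PySem.List.pyRange 0 p.2 1).foldl
      (fun (st : List (List Int) × List (List Int)) _ =>
        let new_generation := st.2.map (fun subset => subset ++ [p.1])
        (st.1 ++ new_generation, new_generation)) (last, last)).1) [[]]

-- ===== PORT B =====
def powerset_helper_alt (elems : List (Int × Int)) : List (List Int) :=
  elems.foldl (fun result p =>
    (PySem.List.pyRange 0 (max p.2 0 + 1) 1).foldl
      (fun new_result k => new_result ++ result.map (fun subset => subset ++ List.replicate k.toNat p.1)) []) [[]]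

-- ===== PRECONDITION & SPEC =====
def Spec_powerset_helper (elems : List (Int × Int)) (out : List (List Int)) : Prop := out = powerset_helper_alt elems
instance (elems : List (Int × Int)) (out : List (List Int)) : Decidable (Spec_powerset_helper elems out) := by unfold Spec_powerset_helper; infer_instance

-- ===== CLAIM (what is proved, stated in full; the proofs are below) =====
def Claim_equal_powerset_helper : Prop := ∀ (elems : List (Int × Int)), Dom_powerset_helper elems → Spec_powerset_helper elems (powerset_helper elems)

-- ===== LEMMAS AND PROOFS =====

-- reference shape: L, then L with 1 copy appended, …, then L with n copies appended
def pvBlocks (e : Int) (L : List (List Int)) : Nat → List (List Int)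
  | 0 => L
  | n+1 => pvBlocks e L n ++ L.map (fun s => s ++ List.replicate (n+1) e)

theorem pvA_inner (e : Int) (L : List (List Int)) (n : Nat) :
    (List.range n).foldl
      (fun (st : List (List Int) × List (List Int)) _ =>
        let new_generation := st.2.map (fun subset => subset ++ [e])
        (st.1 ++ new_generation, new_generation)) (L, L)
    = (pvBlocks e L n, L.map (fun s => s ++ List.replicate n e)) := by
  induction n with
  | zero => simp [pvBlocks]
  | succ n ih =>
    rw [List.range_succ, List.foldl_append, ih]
    simp only [List.foldl_cons, List.foldl_nil, List.map_map]
    refine Prod.ext ?_ ?_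
    · simp [pvBlocks, Function.comp, List.replicate_succ', List.append_assoc]
    · simp [Function.comp, List.replicate_succ', List.append_assoc]

theorem pvB_inner (e : Int) (L : List (List Int)) (n : Nat) :
    (PySem.List.pyRange 0 ((n : Int) + 1) 1).foldl
      (fun new_result k => new_result ++ L.map (fun subset => subset ++ List.replicate k.toNat e)) []
    = pvBlocks e L n := by
  induction n with
  | zero =>
    rw [show ((0 : Nat) : Int) + 1 = 0 + 1 by norm_num, PySem.List.pyRange_one_singleton]
    simp [pvBlocks]
  | succ n ih =>
    rw [show ((n + 1 : Nat) : Int) + 1 = ((n : Int) + 1) + 1 by push_cast; ring,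
        PySem.List.pyRange_one_succ_right (by positivity), List.foldl_append, ih]
    simp [pvBlocks]

theorem pvStep_eq (L : List (List Int)) (p : Int × Int) :
    ((PySem.List.pyRange 0 p.2 1).foldl
      (fun (st : List (List Int) × List (List Int)) _ =>
        let new_generation := st.2.map (fun subset => subset ++ [p.1])
        (st.1 ++ new_generation, new_generation)) (L, L)).1
    = (PySem.List.pyRange 0 (max p.2 0 + 1) 1).foldl
        (fun new_result k => new_result ++ L.map (fun subset => subset ++ List.replicate k.toNat p.1)) [] := by
  have hmax : max p.2 0 + 1 = ((p.2.toNat : Int)) + 1 := by omega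
  rw [hmax, pvB_inner, PySem.List.pyRange_one, List.foldl_map]
  have : (p.2 - 0).toNat = p.2.toNat := by omega
  rw [this, pvA_inner]

theorem pvMain (elems : List (Int × Int)) : powerset_helper elems = powerset_helper_alt elems := by
  unfold powerset_helper powerset_helper_alt
  induction elems using List.reverseRecOn with
  | nil => rfl
  | append_singleton xs p ih =>
    rw [List.foldl_append, List.foldl_append, ih]
    simp only [List.foldl_cons, List.foldl_nil]
    exact pvStep_eq _ p

theorem powerset_helper_spec : Claim_equal_powerset_helper := by
  intro elems _
  exact pvMain elems
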